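-- pv_equiv track=rewrite | github.com/fawazalrasyid/tubes-tba | FiniteAutomata.py | isObjek
-- ===== SOURCE A (Python) =====
-- def isObjek(word: str) -> bool:
--     # Objek = {apel, ayam, air, api, alat}
--     currState = 0
--     for letter in word:
--         match currState:
--             case -1: break
--             case 0:
--                 if letter == 'a': currState = 1
--                 else: currState = -1
--             case 1:
--                 if letter == 'p': currState = 2
--                 elif letter == 'y': currState = 6
--                 elif letter == 'i': currState = 9
--                 elif letter == 'l': currState = 13
--                 else: currState = -1
--             case 2:
--                 if letter == 'e': currState = 3
--                 elif letter == 'i': currState = 10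
--                 else: currState = -1
--             case 3: currState = 4 if letter == 'l' else -1
--             case 4: break # FINAL STATE for 'apel'
--             case 6: currState = 7 if letter == 'a' else -1
--             case 7: currState = 8 if letter == 'm' else -1
--             case 8: break # FINAL STATE for 'ayam'
--             case 9: currState = 10 if letter == 'r' else -1
--             case 10: break # FINAL STATE for 'air' and 'api'
--             case 13: currState = 14 if letter == 'a' else -1
--             case 14: currState = 15 if letter == 't' else -1
--             case 15: break # FINAL STATE for 'alat'
--     return currState in {4, 8, 10, 15}
-- ===== SOURCE B (Python) =====
-- def isObjek(word: str) -> bool: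
--     # The DFA accepts exactly the strings with one of these prefixes.
--     return word.startswith(("apel", "ayam", "air", "api", "alat"))
-- ===== Notes on version B (the rewrite author's own statement) =====
-- stated objective: simpler
-- what changed: Replaced the hand-written per-character DFA state machine by a single prefix test against the five accepted words via str.startswith.
import Mathlib
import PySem

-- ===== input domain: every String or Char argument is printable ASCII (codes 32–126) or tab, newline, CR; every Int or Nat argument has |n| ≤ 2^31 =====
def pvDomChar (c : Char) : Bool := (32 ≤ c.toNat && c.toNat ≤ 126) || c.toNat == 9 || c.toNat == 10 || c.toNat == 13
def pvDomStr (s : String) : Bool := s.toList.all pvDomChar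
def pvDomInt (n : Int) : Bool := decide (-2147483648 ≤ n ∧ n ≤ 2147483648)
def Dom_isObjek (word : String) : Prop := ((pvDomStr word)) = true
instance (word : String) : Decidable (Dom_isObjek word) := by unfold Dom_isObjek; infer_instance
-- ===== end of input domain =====

-- B replaces the hand-written per-character DFA by a direct prefix test against the five accepted words (simpler).


-- ===== PORT A =====
-- the loop over word's letters; `break` (states -1 handled by its case and the final states) returns the state unchanged
def isObjekLoop : Int → List Char → Int
  | s, [] => s
  | s, c :: rest =>
    if s = -1 then s
    else if s = 0 then isObjekLoop (if c = 'a' then 1 else -1) rest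
    else if s = 1 then
      isObjekLoop (if c = 'p' then 2 else if c = 'y' then 6 else if c = 'i' then 9
                   else if c = 'l' then 13 else -1) rest
    else if s = 2 then isObjekLoop (if c = 'e' then 3 else if c = 'i' then 10 else -1) rest
    else if s = 3 then isObjekLoop (if c = 'l' then 4 else -1) rest
    else if s = 4 then s
    else if s = 6 then isObjekLoop (if c = 'a' then 7 else -1) rest
    else if s = 7 then isObjekLoop (if c = 'm' then 8 else -1) rest
    else if s = 8 then s
    else if s = 9 then isObjekLoop (if c = 'r' then 10 else -1) rest
    else if s = 10 then s
    else if s = 13 then isObjekLoop (if c = 'a' then 14 else -1) rest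
    else if s = 14 then isObjekLoop (if c = 't' then 15 else -1) rest
    else if s = 15 then s
    else isObjekLoop s rest  -- Python's match falls through on an unlisted state (unreachable)

def isObjek (word : String) : Bool :=
  ([4, 8, 10, 15] : List Int).contains (isObjekLoop 0 word.toList)

-- ===== PORT B =====
def isObjek_alt (word : String) : Bool :=
  (["apel", "ayam", "air", "api", "alat"] : List String).any
    (fun p => PySem.Str.startswith word p)

-- ===== PRECONDITION & SPEC =====
def Spec_isObjek (word : String) (out : Bool) : Prop := out = isObjek_alt word
instance (word : String) (out : Bool) : Decidable (Spec_isObjek word out) := by unfold Spec_isObjek; infer_instance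

-- ===== CLAIM (what is proved, stated in full; the proofs are below) =====
def Claim_equal_isObjek : Prop := ∀ (word : String), Dom_isObjek word → Spec_isObjek word (isObjek word)

-- ===== LEMMAS AND PROOFS =====



lemma loop_dead (cs : List Char) : isObjekLoop (-1) cs = -1 := by cases cs <;> simp [isObjekLoop]
lemma loop4 (cs : List Char) : isObjekLoop 4 cs = 4 := by cases cs <;> simp [isObjekLoop]
lemma loop8 (cs : List Char) : isObjekLoop 8 cs = 8 := by cases cs <;> simp [isObjekLoop]
lemma loop10 (cs : List Char) : isObjekLoop 10 cs = 10 := by cases cs <;> simp [isObjekLoop]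
lemma loop15 (cs : List Char) : isObjekLoop 15 cs = 15 := by cases cs <;> simp [isObjekLoop]

lemma from3 (cs : List Char) :
    (isObjekLoop 3 cs = 4 ∨ isObjekLoop 3 cs = 8 ∨ isObjekLoop 3 cs = 10 ∨ isObjekLoop 3 cs = 15) ↔ ['l'] <+: cs := by
  cases cs with
  | nil => simp [isObjekLoop]
  | cons c r =>
    by_cases h : c = 'l' <;>
      simp_all [isObjekLoop, loop4, loop_dead, List.cons_prefix_cons, eq_comm (b := c)]

lemma from2 (cs : List Char) :
    (isObjekLoop 2 cs = 4 ∨ isObjekLoop 2 cs = 8 ∨ isObjekLoop 2 cs = 10 ∨ isObjekLoop 2 cs = 15) ↔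
    (['e','l'] <+: cs ∨ ['i'] <+: cs) := by
  cases cs with
  | nil => simp [isObjekLoop]
  | cons c r =>
    by_cases h1 : c = 'e' <;> by_cases h2 : c = 'i' <;>
      simp_all [isObjekLoop, from3, loop10, loop_dead, List.cons_prefix_cons, eq_comm (b := c)]

lemma from9 (cs : List Char) :
    (isObjekLoop 9 cs = 4 ∨ isObjekLoop 9 cs = 8 ∨ isObjekLoop 9 cs = 10 ∨ isObjekLoop 9 cs = 15) ↔ ['r'] <+: cs := by
  cases cs with
  | nil => simp [isObjekLoop]
  | cons c r =>
    by_cases h : c = 'r' <;>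
      simp_all [isObjekLoop, loop10, loop_dead, List.cons_prefix_cons, eq_comm (b := c)]

lemma from7 (cs : List Char) :
    (isObjekLoop 7 cs = 4 ∨ isObjekLoop 7 cs = 8 ∨ isObjekLoop 7 cs = 10 ∨ isObjekLoop 7 cs = 15) ↔ ['m'] <+: cs := by
  cases cs with
  | nil => simp [isObjekLoop]
  | cons c r =>
    by_cases h : c = 'm' <;>
      simp_all [isObjekLoop, loop8, loop_dead, List.cons_prefix_cons, eq_comm (b := c)]

lemma from6 (cs : List Char) :
    (isObjekLoop 6 cs = 4 ∨ isObjekLoop 6 cs = 8 ∨ isObjekLoop 6 cs = 10 ∨ isObjekLoop 6 cs = 15) ↔ ['a','m'] <+: cs := by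
  cases cs with
  | nil => simp [isObjekLoop]
  | cons c r =>
    by_cases h : c = 'a' <;>
      simp_all [isObjekLoop, from7, loop_dead, List.cons_prefix_cons, eq_comm (b := c)]

lemma from14 (cs : List Char) :
    (isObjekLoop 14 cs = 4 ∨ isObjekLoop 14 cs = 8 ∨ isObjekLoop 14 cs = 10 ∨ isObjekLoop 14 cs = 15) ↔ ['t'] <+: cs := by
  cases cs with
  | nil => simp [isObjekLoop]
  | cons c r =>
    by_cases h : c = 't' <;>
      simp_all [isObjekLoop, loop15, loop_dead, List.cons_prefix_cons, eq_comm (b := c)]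

lemma from13 (cs : List Char) :
    (isObjekLoop 13 cs = 4 ∨ isObjekLoop 13 cs = 8 ∨ isObjekLoop 13 cs = 10 ∨ isObjekLoop 13 cs = 15) ↔ ['a','t'] <+: cs := by
  cases cs with
  | nil => simp [isObjekLoop]
  | cons c r =>
    by_cases h : c = 'a' <;>
      simp_all [isObjekLoop, from14, loop_dead, List.cons_prefix_cons, eq_comm (b := c)]

lemma from1 (cs : List Char) :
    (isObjekLoop 1 cs = 4 ∨ isObjekLoop 1 cs = 8 ∨ isObjekLoop 1 cs = 10 ∨ isObjekLoop 1 cs = 15) ↔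
    (['p','e','l'] <+: cs ∨ ['y','a','m'] <+: cs ∨ ['i','r'] <+: cs ∨
     ['p','i'] <+: cs ∨ ['l','a','t'] <+: cs) := by
  cases cs with
  | nil => simp [isObjekLoop]
  | cons c r =>
    by_cases h1 : c = 'p' <;> by_cases h2 : c = 'y' <;> by_cases h3 : c = 'i' <;>
      by_cases h4 : c = 'l' <;>
      simp_all [isObjekLoop, from2, from6, from9, from13, loop_dead, List.cons_prefix_cons, eq_comm (b := c)]

lemma key (cs : List Char) :
    (isObjekLoop 0 cs = 4 ∨ isObjekLoop 0 cs = 8 ∨ isObjekLoop 0 cs = 10 ∨ isObjekLoop 0 cs = 15) ↔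
    (['a','p','e','l'] <+: cs ∨ ['a','y','a','m'] <+: cs ∨ ['a','i','r'] <+: cs ∨
     ['a','p','i'] <+: cs ∨ ['a','l','a','t'] <+: cs) := by
  cases cs with
  | nil => simp [isObjekLoop]
  | cons c r =>
    by_cases h : c = 'a' <;>
      simp_all [isObjekLoop, from1, loop_dead, List.cons_prefix_cons, eq_comm (b := c)]

-- ===== VERDICT (by name: the statement is the Claim_ definition above) =====
theorem isObjek_spec : Claim_equal_isObjek := by
  intro word _
  unfold Spec_isObjek isObjek isObjek_alt
  rw [Bool.eq_iff_iff]
  have h := key word.toList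
  simp only [List.contains_cons, List.contains_nil, Bool.or_eq_true, beq_iff_eq,
    Bool.false_eq_true, or_false, eq_comm (a := isObjekLoop 0 word.toList)] at *
  simp [PySem.Chars.startswith_iff, h]
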